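-- pv_equiv track=rewrite | github.com/dbwebb-se/python | example/old_exams/lp1-2018/solution.py | validate_mobile
-- ===== SOURCE A (Python) =====
-- def validate_mobile(number):
--     """
--     Validate mobile number
--     """
--     if len(number) == 13 and number[3] == "-" and number[7] == " " and number[10] == " ":
--         if number[0:3] in ["070", "072", "073", "076", "079"]:
--             n = number[4:].replace(" ", "")
--             for c in n:
--                 if not c.isdigit():
--                     return False
--             return True
--
--     return False
-- ===== SOURCE B (Python) =====
-- def validate_mobile(number):
--     """
--     Validate mobile number
--     """
--     if len(number) != 13:
--         return False
--     if number[0:3] not in ["070", "072", "073", "076", "079"]: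
--         return False
--     for expected, actual in zip("DDD-DDD DD DD", number):
--         if expected == 'D':
--             if not actual.isdigit():
--                 return False
--         elif actual != expected:
--             return False
--     return True
-- ===== Notes on version B (the rewrite author's own statement) =====
-- stated objective: simpler
-- what changed: Replaces A's indexed separator guards plus its strip-spaces-then-check-digits loop over number[4:] by a single uniform pass matching each character against a format template string (digit marker positions vs literal separators).
-- intended difference: On length-13 strings with valid prefix and separators whose digit positions are all digits or spaces with at least one space (e.g. '070- 23 45 67'), A returns True because it strips spaces from number[4:] before its digit check, while B returns False; rejecting stray spaces in digit positions is the intended reading of the format. — e.g. on validate_mobile("070- 23 45 67"): A returns true, B returns false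
import Mathlib
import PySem

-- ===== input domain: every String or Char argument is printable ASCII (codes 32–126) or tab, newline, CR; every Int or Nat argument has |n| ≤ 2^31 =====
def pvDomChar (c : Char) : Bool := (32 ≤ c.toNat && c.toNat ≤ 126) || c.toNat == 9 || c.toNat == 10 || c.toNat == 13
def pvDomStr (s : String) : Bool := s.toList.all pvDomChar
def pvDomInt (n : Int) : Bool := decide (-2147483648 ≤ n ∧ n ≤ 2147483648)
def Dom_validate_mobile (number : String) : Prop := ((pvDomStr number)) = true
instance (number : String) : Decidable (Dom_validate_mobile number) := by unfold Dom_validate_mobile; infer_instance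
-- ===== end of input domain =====

-- B replaces A's indexed separator guards plus its strip-spaces-then-check-digits loop by a single
-- uniform pass over a format template (digit markers and literal separators); on the exceptional D_ inputs below B is
-- intentionally stricter than A (see the sentence above D_).

-- ===== PORT A =====
-- A's outer guard 'len(number) == 13 and number[3] == "-" and number[7] == " " and number[10] == " "'
def vmShape (number : String) : Bool :=
  PySem.Str.len number == 13 && PySem.Str.pyGet? number 3 == some '-'
    && PySem.Str.pyGet? number 7 == some ' ' && PySem.Str.pyGet? number 10 == some ' '

-- A's inner guard 'number[0:3] in ["070", "072", "073", "076", "079"]'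
def vmPrefix (number : String) : Bool :=
  ["070", "072", "073", "076", "079"].contains (PySem.Str.slice number (some 0) (some 3))

-- the 'for c in n: if not c.isdigit(): return False' loop followed by 'return True'
def vmDigits : List Char → Bool
  | [] => true
  | c :: cs => if !(PySem.Chars.isdigit c) then false else vmDigits cs

def validate_mobile (number : String) : Bool :=
  if vmShape number then
    if vmPrefix number then
      vmDigits (PySem.Str.replace (PySem.Str.slice number (some 4) none) " " "").toList
    else false
  else false

-- ===== PORT B =====
-- the 'for expected, actual in zip("DDD-DDD DD DD", number)' loop of Source B
def vmMatch : List Char → List Char → Bool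
  | t :: ts, c :: cs =>
      if t == 'D' then
        if !(PySem.Chars.isdigit c) then false else vmMatch ts cs
      else if !(c == t) then false else vmMatch ts cs
  | _, _ => true

def validate_mobile_alt (number : String) : Bool :=
  if PySem.Str.len number != 13 then false
  else if !(["070", "072", "073", "076", "079"].contains (PySem.Str.slice number (some 0) (some 3))) then false
  else vmMatch "DDD-DDD DD DD".toList number.toList

-- ===== PRECONDITION & SPEC =====
-- On strings passing A's shape and prefix guards whose seven digit positions are all digits OR
-- SPACES, at least one of them a space (equivalently: at least 3 spaces in the string), A returns
-- True (it strips spaces from number[4:] before its digit check) while B returns False; rejecting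
-- stray spaces in digit positions is the intended reading of the format template.
def D_validate_mobile (number : String) : Prop :=
  (vmShape number && vmPrefix number
    && (number.toList.drop 4).all (fun c => c == ' ' || PySem.Chars.isdigit c)) = true
  ∧ 3 ≤ number.toList.count ' '
instance (number : String) : Decidable (D_validate_mobile number) := by unfold D_validate_mobile; infer_instance

def Spec_validate_mobile (number : String) (out : Bool) : Prop := ¬ D_validate_mobile number → out = validate_mobile_alt number
instance (number : String) (out : Bool) : Decidable (Spec_validate_mobile number out) := by unfold Spec_validate_mobile; infer_instance

def pvDiffWitness_validate_mobile : String := "070- 23 45 67"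
def pvDiffWitnessOut_validate_mobile : Bool × Bool := (true, false)

-- ===== CLAIM (what is proved, stated in full; the proofs are below) =====
def Claim_unchanged_validate_mobile : Prop := ∀ (number : String), Dom_validate_mobile number → Spec_validate_mobile number (validate_mobile number)
def Claim_changed_validate_mobile : Prop := Dom_validate_mobile (pvDiffWitness_validate_mobile) ∧ D_validate_mobile (pvDiffWitness_validate_mobile) ∧ validate_mobile (pvDiffWitness_validate_mobile) = pvDiffWitnessOut_validate_mobile.1 ∧ validate_mobile_alt (pvDiffWitness_validate_mobile) = pvDiffWitnessOut_validate_mobile.2 ∧ pvDiffWitnessOut_validate_mobile.1 ≠ pvDiffWitnessOut_validate_mobile.2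
def Claim_exact_validate_mobile : Prop := ∀ (number : String), Dom_validate_mobile number → D_validate_mobile number → validate_mobile number ≠ validate_mobile_alt number

-- ===== LEMMAS AND PROOFS =====

lemma vmDigits_eq_all (l : List Char) : vmDigits l = l.all PySem.Chars.isdigit := by
  induction l with
  | nil => rfl
  | cons c cs ih => cases h : PySem.Chars.isdigit c <;> simp [vmDigits, ih, h]

lemma replace_go_space (l : List Char) : ∀ (fuel : Nat) (acc : List Char), l.length ≤ fuel →
    PySem.Chars.replace.go [' '] [] fuel l acc = acc.reverse ++ l.filter (fun c => !(c == ' ')) := by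
  induction l with
  | nil => intro fuel acc h; cases fuel <;> simp [PySem.Chars.replace.go]
  | cons c cs ih =>
    intro fuel acc h
    cases fuel with
    | zero => simp at h
    | succ n =>
      simp only [PySem.Chars.replace.go, List.isPrefixOf]
      by_cases hc : c = ' '
      · subst hc; simp [ih n acc (by simpa using h)]
      · simp [hc, ih n (c :: acc) (by simpa using h)]
        exact fun h' => absurd h'.symm hc

lemma replace_space (l : List Char) : PySem.Chars.replace l [' '] [] = l.filter (fun c => !(c == ' ')) := by
  simp [PySem.Chars.replace, replace_go_space l l.length [] (le_refl _)]

-- A's value as one boolean expression: guards, then 'every char of number[4:] is a space or digit'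
lemma A_unfold (number : String) :
    validate_mobile number
      = (vmShape number && vmPrefix number
          && (number.toList.drop 4).all (fun c => c == ' ' || PySem.Chars.isdigit c)) := by
  unfold validate_mobile
  cases h1 : vmShape number <;> cases h2 : vmPrefix number <;>
    simp [vmDigits_eq_all, PySem.Str.toList_replace, PySem.Str.toList_slice,
      PySem.List.slice_from, replace_space]

lemma shape_len (number : String) (h : vmShape number = true) : number.toList.length = 13 := by
  simp [vmShape, PySem.Str.len_eq] at h
  have h1 : (number.length : Int) = 13 := h.1.1.1
  rw [number.length_toList]
  exact_mod_cast h1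

-- D_ is exactly 'A accepts and the string has a third space (one in a digit slot)'
lemma D_iff (number : String) :
    D_validate_mobile number ↔ (validate_mobile number = true ∧ 3 ≤ number.toList.count ' ') := by
  unfold D_validate_mobile
  rw [A_unfold]

lemma list13 (l : List Char) (h : l.length = 13) :
    ∃ c0 c1 c2 c3 c4 c5 c6 c7 c8 c9 c10 c11 c12,
      l = [c0, c1, c2, c3, c4, c5, c6, c7, c8, c9, c10, c11, c12] := by
  rcases l with _|⟨c0,_|⟨c1,_|⟨c2,_|⟨c3,_|⟨c4,_|⟨c5,_|⟨c6,_|⟨c7,_|⟨c8,_|⟨c9,_|⟨c10,_|⟨c11,_|⟨c12,_|⟨c13,l⟩⟩⟩⟩⟩⟩⟩⟩⟩⟩⟩⟩⟩⟩ <;> simp_all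

-- A accepts iff: separators in place, valid prefix, and every character of number[4:] is a space or a digit
lemma A_char (number : String) (c0 c1 c2 c3 c4 c5 c6 c7 c8 c9 c10 c11 c12 : Char)
    (hL : number.toList = [c0,c1,c2,c3,c4,c5,c6,c7,c8,c9,c10,c11,c12]) :
    validate_mobile number = true ↔
      ((c3 = '-' ∧ c7 = ' ') ∧ c10 = ' ') ∧
      (c0 = '0' ∧ c1 = '7' ∧ c2 = '0' ∨ c0 = '0' ∧ c1 = '7' ∧ c2 = '2' ∨
        c0 = '0' ∧ c1 = '7' ∧ c2 = '3' ∨ c0 = '0' ∧ c1 = '7' ∧ c2 = '6' ∨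
        c0 = '0' ∧ c1 = '7' ∧ c2 = '9') ∧
      ((c4 = ' ' ∨ PySem.Chars.isdigit c4 = true) ∧ (c5 = ' ' ∨ PySem.Chars.isdigit c5 = true) ∧
       (c6 = ' ' ∨ PySem.Chars.isdigit c6 = true) ∧ (c8 = ' ' ∨ PySem.Chars.isdigit c8 = true) ∧
       (c9 = ' ' ∨ PySem.Chars.isdigit c9 = true) ∧ (c11 = ' ' ∨ PySem.Chars.isdigit c11 = true) ∧
       (c12 = ' ' ∨ PySem.Chars.isdigit c12 = true)) := by
  simp [validate_mobile, vmShape, vmPrefix, PySem.Str.len_eq, hL, PySem.Str.pyGet?, PySem.List.pyGet?,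
    PySem.Str.toList_slice, PySem.List.pyIdx?, ← String.toList_inj,
    PySem.List.slice_to, PySem.List.slice_from, replace_space, vmDigits_eq_all]
  intro h3 h7 h10 _
  subst h7 h10
  simp

-- B accepts iff: valid prefix and every character matches the template "DDD-DDD DD DD"
lemma B_char (number : String) (c0 c1 c2 c3 c4 c5 c6 c7 c8 c9 c10 c11 c12 : Char)
    (hL : number.toList = [c0,c1,c2,c3,c4,c5,c6,c7,c8,c9,c10,c11,c12]) :
    validate_mobile_alt number = true ↔
      (c0 = '0' ∧ c1 = '7' ∧ c2 = '0' ∨ c0 = '0' ∧ c1 = '7' ∧ c2 = '2' ∨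
        c0 = '0' ∧ c1 = '7' ∧ c2 = '3' ∨ c0 = '0' ∧ c1 = '7' ∧ c2 = '6' ∨
        c0 = '0' ∧ c1 = '7' ∧ c2 = '9') ∧
      (PySem.Chars.isdigit c0 = true ∧ PySem.Chars.isdigit c1 = true ∧ PySem.Chars.isdigit c2 = true ∧
       c3 = '-' ∧ PySem.Chars.isdigit c4 = true ∧ PySem.Chars.isdigit c5 = true ∧
       PySem.Chars.isdigit c6 = true ∧ c7 = ' ' ∧ PySem.Chars.isdigit c8 = true ∧
       PySem.Chars.isdigit c9 = true ∧ c10 = ' ' ∧ PySem.Chars.isdigit c11 = true ∧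
       PySem.Chars.isdigit c12 = true) := by
  simp [validate_mobile_alt, PySem.Str.len_eq, hL, PySem.Str.toList_slice,
    ← String.toList_inj, PySem.List.slice_to, vmMatch]

-- a third space in an A-shaped string is a space in one of the seven digit slots
lemma count_slots (c2 c4 c5 c6 c8 c9 c11 c12 : Char) (h2 : c2 ≠ ' ') :
    3 ≤ (['0','7',c2,'-',c4,c5,c6,' ',c8,c9,' ',c11,c12].count ' ') ↔
      (c4 = ' ' ∨ c5 = ' ' ∨ c6 = ' ' ∨ c8 = ' ' ∨ c9 = ' ' ∨ c11 = ' ' ∨ c12 = ' ') := by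
  simp [List.count_cons, h2]
  split_ifs <;> simp_all

lemma slot_digit {c : Char} (h : c = ' ' ∨ PySem.Chars.isdigit c = true) (hne : c ≠ ' ') :
    PySem.Chars.isdigit c = true := h.resolve_left hne

lemma B_false_of_short (number : String) (h : number.toList.length ≠ 13) :
    validate_mobile_alt number = false := by
  have hlen : (↑(number.length) : Int) ≠ 13 := by
    rw [← number.length_toList]; exact_mod_cast h
  simp [validate_mobile_alt, PySem.Str.len_eq, hlen]

lemma main_eq (number : String) (hD : ¬ D_validate_mobile number) :
    validate_mobile number = validate_mobile_alt number := by
  rw [D_iff] at hD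
  by_cases hA : validate_mobile number = true
  · -- A accepts and (by ¬D_) there is no stray space: B accepts too
    have hcnt : ¬ 3 ≤ number.toList.count ' ' := fun h => hD ⟨hA, h⟩
    have hS : vmShape number = true := by
      have h' := hA
      rw [A_unfold] at h'
      simp at h'
      exact h'.1.1
    obtain ⟨c0,c1,c2,c3,c4,c5,c6,c7,c8,c9,c10,c11,c12,hL⟩ := list13 _ (shape_len number hS)
    obtain ⟨⟨⟨h3, h7⟩, h10⟩, hmem, s4, s5, s6, s8, s9, s11, s12⟩ :=
      (A_char number _ _ _ _ _ _ _ _ _ _ _ _ _ hL).mp hA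
    subst h3 h7 h10
    rw [hL] at hcnt
    have hB : validate_mobile_alt number = true := by
      rw [B_char number _ _ _ _ _ _ _ _ _ _ _ _ _ hL]
      rcases hmem with ⟨e0,e1,e2⟩|⟨e0,e1,e2⟩|⟨e0,e1,e2⟩|⟨e0,e1,e2⟩|⟨e0,e1,e2⟩ <;>
        subst e0 e1 e2 <;>
        · have hnone := fun hor =>
            hcnt ((count_slots _ c4 c5 c6 c8 c9 c11 c12 (by decide)).mpr hor)
          exact ⟨by decide, by decide, by decide, by decide, rfl,
            slot_digit s4 (fun e => hnone (Or.inl e)),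
            slot_digit s5 (fun e => hnone (Or.inr (Or.inl e))),
            slot_digit s6 (fun e => hnone (Or.inr (Or.inr (Or.inl e)))), rfl,
            slot_digit s8 (fun e => hnone (Or.inr (Or.inr (Or.inr (Or.inl e))))),
            slot_digit s9 (fun e => hnone (Or.inr (Or.inr (Or.inr (Or.inr (Or.inl e)))))), rfl,
            slot_digit s11 (fun e => hnone (Or.inr (Or.inr (Or.inr (Or.inr (Or.inr (Or.inl e))))))),
            slot_digit s12 (fun e => hnone (Or.inr (Or.inr (Or.inr (Or.inr (Or.inr (Or.inr e)))))))⟩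
    rw [hA, hB]
  · -- A rejects: B rejects as well (B only accepts fully digit slots, which A accepts)
    rw [Bool.not_eq_true] at hA
    rw [hA]
    by_contra hB
    have hB' : validate_mobile_alt number = true := by
      cases h : validate_mobile_alt number
      · exact absurd h.symm hB
      · rfl
    have h13 : number.toList.length = 13 := by
      by_contra h
      rw [B_false_of_short number h] at hB'
      exact Bool.false_ne_true hB' 
    obtain ⟨c0,c1,c2,c3,c4,c5,c6,c7,c8,c9,c10,c11,c12,hL⟩ := list13 _ h13
    obtain ⟨hmem, d0, d1, d2, h3, d4, d5, d6, h7, d8, d9, h10, d11, d12⟩ :=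
      (B_char number _ _ _ _ _ _ _ _ _ _ _ _ _ hL).mp hB'
    have hA' : validate_mobile number = true :=
      (A_char number _ _ _ _ _ _ _ _ _ _ _ _ _ hL).mpr
        ⟨⟨⟨h3, h7⟩, h10⟩, hmem, Or.inr d4, Or.inr d5, Or.inr d6, Or.inr d8, Or.inr d9,
          Or.inr d11, Or.inr d12⟩
    rw [hA] at hA'
    exact Bool.false_ne_true hA'

-- ===== VERDICT (by name: the statement is the Claim_ definition above) =====
theorem validate_mobile_spec : Claim_unchanged_validate_mobile := by
  intro number _ h
  exact main_eq number h

theorem validate_mobile_changed : Claim_changed_validate_mobile := by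
  unfold Claim_changed_validate_mobile; decide

theorem validate_mobile_tight : Claim_exact_validate_mobile := by
  intro number _ hD
  rw [D_iff] at hD
  obtain ⟨hA, hcnt⟩ := hD
  have hS : vmShape number = true := by
    have h' := hA
    rw [A_unfold] at h'
    simp at h'
    exact h'.1.1
  obtain ⟨c0,c1,c2,c3,c4,c5,c6,c7,c8,c9,c10,c11,c12,hL⟩ := list13 _ (shape_len number hS)
  rw [hA]
  intro hB
  have hB' : validate_mobile_alt number = true := hB.symm
  obtain ⟨hmem, d0, d1, d2, h3, d4, d5, d6, h7, d8, d9, h10, d11, d12⟩ :=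
    (B_char number _ _ _ _ _ _ _ _ _ _ _ _ _ hL).mp hB'
  subst h3 h7 h10
  rw [hL] at hcnt
  rcases hmem with ⟨e0,e1,e2⟩|⟨e0,e1,e2⟩|⟨e0,e1,e2⟩|⟨e0,e1,e2⟩|⟨e0,e1,e2⟩ <;>
    subst e0 e1 e2 <;>
    · rcases (count_slots _ c4 c5 c6 c8 c9 c11 c12 (by decide)).mp hcnt with e|e|e|e|e|e|e <;>
        subst e <;>
        first
          | exact absurd d4 (by decide) | exact absurd d5 (by decide)
          | exact absurd d6 (by decide) | exact absurd d8 (by decide)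
          | exact absurd d9 (by decide) | exact absurd d11 (by decide)
          | exact absurd d12 (by decide)
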